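-- pv_equiv track=rewrite | github.com/mingZZ-3/Algorithm | python/Programmers/고득점Kit/해시-폰켓몬.py | solution
-- ===== SOURCE A (Python) =====
-- def solution(nums):
--     poke = {}
--     for item in nums:
--         if not item in poke:
--             poke[item] = 1
--         else:
--             poke[item] += 1
--     if len(poke.keys()) >= len(nums)/2:
--         return int(len(nums)/2)
--     else:
--         return int(len(poke.keys()))
-- ===== SOURCE B (Python) =====
-- def solution(nums):
--     s = sorted(nums)
--     distinct = 1 if s else 0
--     for i in range(1, len(s)):
--         if s[i] != s[i - 1]:
--             distinct += 1
--     return min(distinct, len(nums) // 2)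
-- ===== Notes on version B (the rewrite author's own statement) =====
-- stated objective: alternative
-- what changed: Replaces A's hash-map frequency dict and branchy float comparison with a sort-then-adjacent-scan distinct count and a plain min(distinct, n//2).
import Mathlib
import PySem

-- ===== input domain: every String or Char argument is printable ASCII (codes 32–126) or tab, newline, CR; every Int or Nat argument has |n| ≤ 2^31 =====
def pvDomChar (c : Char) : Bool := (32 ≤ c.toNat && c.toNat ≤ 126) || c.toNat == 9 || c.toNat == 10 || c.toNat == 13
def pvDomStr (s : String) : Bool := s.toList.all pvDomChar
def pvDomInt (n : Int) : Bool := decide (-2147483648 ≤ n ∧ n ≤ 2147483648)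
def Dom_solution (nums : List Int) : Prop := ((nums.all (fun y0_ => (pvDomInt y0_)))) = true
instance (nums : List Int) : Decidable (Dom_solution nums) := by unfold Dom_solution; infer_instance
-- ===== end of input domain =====

-- B replaces A's frequency-dict distinct count with a sort-then-adjacent-scan count and min(distinct, n//2): a different algorithm of similar cost.


-- ===== PORT A =====
-- the loop: poke[item] = 1 if absent, else poke[item] += 1
def solution_build (nums : List Int) : PySem.Dict Int Int :=
  nums.foldl (fun poke item =>
    if poke.contains item = false then poke.insert item 1
    else poke.insert item (poke.getD item 0 + 1)) PySem.Dict.empty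

-- 'len(poke.keys()) >= len(nums)/2' with float n/2 is exactly '2*k ≥ n' on these sizes;
-- 'int(len(nums)/2)' is n//2 since n ≥ 0
def solution (nums : List Int) : Int :=
  if 2 * ((solution_build nums).keys.length : Int) ≥ (nums.length : Int) then
    PySem.Int.floordiv (nums.length : Int) 2
  else
    ((solution_build nums).keys.length : Int)

-- ===== PORT B =====
-- the loop 'for i in range(1, len(s)): if s[i] != s[i-1]: distinct += 1', as the obvious
-- structural recursion carrying the previous element
def solution_scan (prev : Int) : List Int → Int
  | [] => 0
  | y :: ys => (if y ≠ prev then 1 else 0) + solution_scan y ys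

def solution_distinct : List Int → Int
  | [] => 0
  | x :: xs => 1 + solution_scan x xs

def solution_alt (nums : List Int) : Int :=
  min (solution_distinct (PySem.List.sorted nums (fun x => x) false))
      (PySem.Int.floordiv (nums.length : Int) 2)

-- ===== PRECONDITION & SPEC =====
def Spec_solution (nums : List Int) (out : Int) : Prop := out = solution_alt nums
instance (nums : List Int) (out : Int) : Decidable (Spec_solution nums out) := by unfold Spec_solution; infer_instance

-- ===== CLAIM (what is proved, stated in full; the proofs are below) =====
def Claim_equal_solution : Prop := ∀ (nums : List Int), Dom_solution nums → Spec_solution nums (solution nums)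

-- ===== LEMMAS AND PROOFS =====

-- A's dict keys are the distinct elements of nums
theorem solution_build_keys (nums : List Int) :
    (solution_build nums).keys = PySem.Set.update (PySem.Dict.empty : PySem.Dict Int Int).keys nums := by
  unfold solution_build
  have h : (fun (poke : PySem.Dict Int Int) (item : Int) =>
      if poke.contains item = false then poke.insert item 1
      else poke.insert item (poke.getD item 0 + 1)) =
      (fun (poke : PySem.Dict Int Int) (item : Int) =>
      poke.insert item (if poke.contains item = false then 1 else poke.getD item 0 + 1)) := by
    funext poke item; split <;> rfl
  rw [h, PySem.Dict.keys_foldl_insert]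

theorem keys_length_eq_card (nums : List Int) :
    (solution_build nums).keys.length = nums.toFinset.card := by
  rw [solution_build_keys]
  have hnd : (PySem.Set.update ([] : List Int) nums).Nodup :=
    PySem.Set.nodup_update [] nums List.nodup_nil
  have : (PySem.Set.update ([] : List Int) nums).toFinset = nums.toFinset := by
    apply Finset.ext; intro a
    simp [List.mem_toFinset, PySem.Set.mem_update]
  calc (PySem.Set.update (PySem.Dict.empty : PySem.Dict Int Int).keys nums).length
      = (PySem.Set.update ([] : List Int) nums).toFinset.card := by
        rw [List.toFinset_card_of_nodup hnd]; rfl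
    _ = nums.toFinset.card := by rw [this]

-- B's adjacent scan on an ordered list counts the distinct elements
theorem scan_eq_card (prev : Int) (l : List Int) (hl : l.Pairwise (· ≤ ·))
    (hp : ∀ y ∈ l, prev ≤ y) :
    1 + solution_scan prev l = ((insert prev l.toFinset).card : Int) := by
  induction l generalizing prev with
  | nil => simp [solution_scan]
  | cons y ys ih =>
    rcases List.pairwise_cons.mp hl with ⟨hy, hys⟩
    have hpy : prev ≤ y := hp y (List.mem_cons_self)
    by_cases hne : y = prev
    · subst hne
      simp only [solution_scan, ne_eq, not_true_eq_false, ite_false]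
      rw [zero_add, ih y hys hy]
      congr 2
      simp
    · have hlt : prev < y := lt_of_le_of_ne hpy (fun h => hne h.symm)
      simp only [solution_scan, ne_eq, hne, not_false_eq_true, if_pos]
      have hnotmem : prev ∉ insert y ys.toFinset := by
        simp only [Finset.mem_insert, List.mem_toFinset]
        rintro (h | h)
        · exact absurd h.symm (ne_of_lt hlt).symm
        · exact absurd rfl (ne_of_lt (lt_of_lt_of_le hlt (hy prev h)))
      rw [show (1 : Int) + (1 + solution_scan y ys) = 1 + (1 + solution_scan y ys) by ring,
          ih y hys hy, List.toFinset_cons, Finset.card_insert_of_notMem hnotmem]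
      push_cast; ring

theorem distinct_eq_card (nums : List Int) :
    solution_distinct (PySem.List.sorted nums (fun x => x) false) = (nums.toFinset.card : Int) := by
  have hperm : (PySem.List.sorted nums (fun x => x) false).Perm nums := PySem.List.sorted_perm ..
  have hfin : (PySem.List.sorted nums (fun x => x) false).toFinset = nums.toFinset := by
    apply Finset.ext; intro a; simp [List.mem_toFinset, PySem.List.mem_sorted]
  have hpw : (PySem.List.sorted nums (fun x => x) false).Pairwise (fun a b => a ≤ b) :=
    PySem.List.sorted_pairwise ..
  rw [← hfin]
  cases hs : PySem.List.sorted nums (fun x => x) false with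
  | nil => simp [solution_distinct]
  | cons x xs =>
    rw [hs] at hpw
    rcases List.pairwise_cons.mp hpw with ⟨hx, hxs⟩
    have := scan_eq_card x xs hxs (fun y hy => hx y hy)
    simp only [solution_distinct, List.toFinset_cons]
    exact this

-- ===== VERDICT (by name: the statement is the Claim_ definition above) =====
theorem solution_spec : Claim_equal_solution := by
  intro nums _
  unfold Spec_solution solution solution_alt
  rw [keys_length_eq_card, distinct_eq_card]
  have hfd : PySem.Int.floordiv (nums.length : Int) 2 = (nums.length : Int) / 2 := by
    show ((nums.length : Int)).fdiv 2 = _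
    rw [Int.fdiv_eq_ediv]; simp
  rw [hfd]
  omega
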